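-- pv_equiv track=rewrite | github.com/adzcai/neurorl | envs/blocksworld/utils.py | go_activate_block
-- ===== SOURCE A (Python) =====
-- def go_activate_block(curblock, newblock, action_goto_next=[19], action_goto_prev=[20]):
-- 	'''
-- 	Input:
-- 		curblock: (int)
-- 			currently activated block assembly id in BLOCKS area
-- 			should be in range [-1, max blocks in brain]
-- 		newblock: (int)
-- 			the new blockid to be activated
-- 		action_goto_next: (list of int)
-- 			a list of action indices to activate the next block assembly
-- 		action_goto_prev: (list of int)
-- 			a list of action indices to activate the previous block assembly
-- 	Return:
-- 		actions: (list of int)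
-- 			list of action indices to activate newblock id
-- 	'''
-- 	actions = []
-- 	diff = curblock-newblock
-- 	while diff != 0:
-- 		if diff > 0:
-- 			actions += action_goto_prev
-- 			curblock -= 1
-- 		else:
-- 			actions += action_goto_next
-- 			curblock += 1
-- 		diff = curblock-newblock
-- 	return actions
-- ===== SOURCE B (Python) =====
-- def go_activate_block(curblock, newblock, action_goto_next=[19], action_goto_prev=[20]):
--     diff = curblock - newblock
--     if diff > 0:
--         return action_goto_prev * diff
--     elif diff < 0:
--         return action_goto_next * (-diff)
--     return []
-- ===== Notes on version B (the rewrite author's own statement) =====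
-- stated objective: simpler
-- what changed: Replaces the step-by-step while loop (appending one action list per unit move and re-deriving diff each iteration) with a closed form: compute diff once and build the whole result by list multiplication with |diff|.
import Mathlib
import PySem

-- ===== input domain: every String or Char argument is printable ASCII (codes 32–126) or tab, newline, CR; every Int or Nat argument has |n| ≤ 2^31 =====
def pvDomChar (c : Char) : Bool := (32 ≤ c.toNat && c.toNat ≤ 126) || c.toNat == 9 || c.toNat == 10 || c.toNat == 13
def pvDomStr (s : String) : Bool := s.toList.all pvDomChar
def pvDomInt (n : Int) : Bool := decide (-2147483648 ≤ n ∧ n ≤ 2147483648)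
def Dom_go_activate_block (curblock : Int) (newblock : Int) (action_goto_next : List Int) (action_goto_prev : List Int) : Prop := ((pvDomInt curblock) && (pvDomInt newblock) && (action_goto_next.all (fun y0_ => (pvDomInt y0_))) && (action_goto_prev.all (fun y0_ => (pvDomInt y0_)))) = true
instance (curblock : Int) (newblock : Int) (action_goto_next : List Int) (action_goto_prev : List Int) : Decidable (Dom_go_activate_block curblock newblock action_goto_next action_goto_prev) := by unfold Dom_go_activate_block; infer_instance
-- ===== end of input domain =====

-- B replaces A's one-step-at-a-time while loop with a closed form built by list multiplication (objective: simpler).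
-- ===== PORT A =====
-- the while loop: state (actions, curblock), re-testing diff = curblock - newblock each iteration
def goLoop (curblock : Int) (newblock : Int) (action_goto_next : List Int) (action_goto_prev : List Int) (actions : List Int) : List Int :=
  if curblock - newblock = 0 then actions
  else if curblock - newblock > 0 then
    goLoop (curblock - 1) newblock action_goto_next action_goto_prev (actions ++ action_goto_prev)
  else
    goLoop (curblock + 1) newblock action_goto_next action_goto_prev (actions ++ action_goto_next)
termination_by (curblock - newblock).natAbs
decreasing_by all_goals omega

def go_activate_block (curblock : Int) (newblock : Int) (action_goto_next : List Int) (action_goto_prev : List Int) : List Int :=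
  goLoop curblock newblock action_goto_next action_goto_prev []

-- ===== PORT B =====
-- list * n in Python = flatten (replicate n list); non-positive n gives []
def go_activate_block_alt (curblock : Int) (newblock : Int) (action_goto_next : List Int) (action_goto_prev : List Int) : List Int :=
  let diff := curblock - newblock
  if diff > 0 then (List.replicate diff.toNat action_goto_prev).flatten
  else if diff < 0 then (List.replicate (-diff).toNat action_goto_next).flatten
  else []

-- ===== PRECONDITION & SPEC =====
def Spec_go_activate_block (curblock : Int) (newblock : Int) (action_goto_next : List Int) (action_goto_prev : List Int) (out : List Int) : Prop := out = go_activate_block_alt curblock newblock action_goto_next action_goto_prev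
instance (curblock : Int) (newblock : Int) (action_goto_next : List Int) (action_goto_prev : List Int) (out : List Int) : Decidable (Spec_go_activate_block curblock newblock action_goto_next action_goto_prev out) := by unfold Spec_go_activate_block; infer_instance

-- ===== CLAIM (what is proved, stated in full; the proofs are below) =====
def Claim_equal_go_activate_block : Prop := ∀ (curblock : Int) (newblock : Int) (action_goto_next : List Int) (action_goto_prev : List Int), Dom_go_activate_block curblock newblock action_goto_next action_goto_prev → Spec_go_activate_block curblock newblock action_goto_next action_goto_prev (go_activate_block curblock newblock action_goto_next action_goto_prev)

-- ===== LEMMAS AND PROOFS =====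

-- ===== VERDICT (by name: the statement is the Claim_ definition above) =====
theorem alt_step_pos (c nb : Int) (nx pv : List Int) (h : c - nb > 0) :
    go_activate_block_alt c nb nx pv = pv ++ go_activate_block_alt (c - 1) nb nx pv := by
  unfold go_activate_block_alt
  by_cases h1 : c - 1 - nb > 0
  · have ht : (c - nb).toNat = (c - 1 - nb).toNat + 1 := by omega
    simp only [h, h1, if_pos, ht, List.replicate_succ, List.flatten_cons]
  · have h0 : c - 1 - nb = 0 := by omega
    have ht : (c - nb).toNat = 1 := by omega
    simp [ht, show nb < c by omega, show ¬ nb < c - 1 by omega, show ¬ c - 1 < nb by omega]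

theorem alt_step_neg (c nb : Int) (nx pv : List Int) (h : c - nb < 0) :
    go_activate_block_alt c nb nx pv = nx ++ go_activate_block_alt (c + 1) nb nx pv := by
  unfold go_activate_block_alt
  by_cases h1 : c + 1 - nb < 0
  · have ht : (-(c - nb)).toNat = (-(c + 1 - nb)).toNat + 1 := by omega
    simp only [show ¬ c - nb > 0 by omega, show ¬ c + 1 - nb > 0 by omega, if_neg,
      not_false_eq_true, h, h1, if_pos, ht, List.replicate_succ, List.flatten_cons]
  · have h0 : c + 1 - nb = 0 := by omega
    have ht : (-(c - nb)).toNat = 1 := by omega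
    simp [show (nb - c).toNat = 1 by omega, show c < nb by omega, show ¬ nb < c + 1 by omega, show ¬ c + 1 < nb by omega,
      show ¬ nb < c by omega]

theorem goLoop_eq (n : Nat) : ∀ (c nb : Int) (nx pv acc : List Int), (c - nb).natAbs = n →
    goLoop c nb nx pv acc = acc ++ go_activate_block_alt c nb nx pv := by
  induction n with
  | zero =>
    intro c nb nx pv acc h
    have hz : c - nb = 0 := by omega
    unfold goLoop go_activate_block_alt
    simp [hz]
  | succ k ih =>
    intro c nb nx pv acc h
    unfold goLoop
    by_cases hz : c - nb = 0
    · omega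
    · by_cases hp : c - nb > 0
      · simp only [hz, hp, if_false, if_true]
        rw [ih (c - 1) nb nx pv (acc ++ pv) (by omega), alt_step_pos c nb nx pv hp,
          List.append_assoc]
      · simp only [hz, hp, if_false]
        rw [ih (c + 1) nb nx pv (acc ++ nx) (by omega),
          alt_step_neg c nb nx pv (by omega), List.append_assoc]

theorem go_activate_block_spec : Claim_equal_go_activate_block := by
  intro c nb nx pv _
  unfold Spec_go_activate_block go_activate_block
  simpa using goLoop_eq (c - nb).natAbs c nb nx pv [] rfl
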